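-- pv_equiv track=rewrite | github.com/ernesto-munoz/adventcalendar | 2024/day4/day4.py | is_x_mas_in_position
-- ===== SOURCE A (Python) =====
-- def is_x_mas_in_position(soup: list[str], row: int, column: int,) -> bool:
--     """Search the X-MAC in the char matrix in a given position"""
--     if row < 0 or row >= len(soup) or column < 0 or column >= len(soup[row]):
--         return False
--     if soup[row][column] != "A":
--         return False
--
--     # search M in each corner and S in the contrary (can cut execution before all checks)
--     mas_found = 0
--     for pos in [(( 1, -1), (-1,  1)),
--                 (( 1,  1), (-1, -1)),
--                 ((-1, -1), ( 1,  1)),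
--                 ((-1,  1), ( 1, -1))]:
--         r1 = row + pos[0][0]
--         c1 = column + pos[0][1]
--         r2 = row + pos[1][0]
--         c2 = column + pos[1][1]
--         if r1 < 0 or r1 >= len(soup) or c1 < 0 or c1 >= len(soup[row]):
--             continue
--         if r2 < 0 or r2 >= len(soup) or c2 < 0 or c2 >= len(soup[row]):
--             continue
--         if soup[r1][c1] == "M" and soup[r2][c2] == "S":
--             mas_found += 1
--     return mas_found == 2
-- ===== SOURCE B (Python) =====
-- def is_x_mas_in_position(soup: list[str], row: int, column: int) -> bool:
--     """Search the X-MAS in the char matrix in a given position"""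
--     if row < 0 or row >= len(soup) or column < 0 or column >= len(soup[row]):
--         return False
--     if soup[row][column] != "A":
--         return False
--     w = len(soup[row])
--     # all four corners must pass the bounds test (width taken from the center row, as upstream)
--     if row - 1 < 0 or row + 1 >= len(soup) or column - 1 < 0 or column + 1 >= w:
--         return False
--     tl = soup[row - 1][column - 1]
--     tr = soup[row - 1][column + 1]
--     bl = soup[row + 1][column - 1]
--     br = soup[row + 1][column + 1]
--     def mas(a, b):
--         return (a == "M" and b == "S") or (a == "S" and b == "M")
--     return mas(tl, br) and mas(tr, bl)
-- ===== Notes on version B (the rewrite author's own statement) =====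
-- stated objective: simpler
-- what changed: Replaced the 4-orientation loop with its counter and 'count == 2' test by a single bounds check and a direct read of the four corner characters, returning whether each diagonal is an M/S pair.
import Mathlib
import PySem

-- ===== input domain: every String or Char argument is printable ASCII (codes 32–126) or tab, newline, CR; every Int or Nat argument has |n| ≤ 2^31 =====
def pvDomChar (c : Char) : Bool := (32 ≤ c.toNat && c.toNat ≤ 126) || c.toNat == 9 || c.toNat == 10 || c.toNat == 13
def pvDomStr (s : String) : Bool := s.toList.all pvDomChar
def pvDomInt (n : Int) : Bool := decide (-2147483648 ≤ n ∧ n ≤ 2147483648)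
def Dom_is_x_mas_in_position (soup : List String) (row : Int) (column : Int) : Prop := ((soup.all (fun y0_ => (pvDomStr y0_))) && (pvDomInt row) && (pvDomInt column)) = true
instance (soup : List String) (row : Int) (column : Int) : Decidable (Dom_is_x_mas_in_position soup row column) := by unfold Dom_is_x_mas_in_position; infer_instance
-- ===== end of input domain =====

-- B replaces A's 4-orientation loop and counter by directly reading the four corner
-- characters and testing the two diagonals for an M/S pair (objective: simpler).

-- len(soup[r]) as an Int (0 when r is out of range; only used behind in-range guards)
def pvRowLen (soup : List String) (r : Int) : Int :=
  ((PySem.List.pyGet? soup r).map (fun s => (PySem.Str.len s : Int))).getD 0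

-- soup[r][c] (none = IndexError; admitted inputs never hit none where Python would raise)
def pvCharAt (soup : List String) (r : Int) (c : Int) : Option Char :=
  (PySem.List.pyGet? soup r).bind (fun s => PySem.Str.pyGet? s c)

-- ===== PORT A =====
-- the literal orientation list from A's for-loop
def pvOrients : List ((Int × Int) × (Int × Int)) :=
  [((1, -1), (-1, 1)), ((1, 1), (-1, -1)), ((-1, -1), (1, 1)), ((-1, 1), (1, -1))]

def is_x_mas_in_position (soup : List String) (row : Int) (column : Int) : Bool :=
  if row < 0 ∨ row ≥ (soup.length : Int) ∨ column < 0 ∨ column ≥ pvRowLen soup row then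
    false
  else if pvCharAt soup row column ≠ some 'A' then
    false
  else
    let masFound : Nat := pvOrients.foldl (fun acc pos =>
      let r1 := row + pos.1.1
      let c1 := column + pos.1.2
      let r2 := row + pos.2.1
      let c2 := column + pos.2.2
      if r1 < 0 ∨ r1 ≥ (soup.length : Int) ∨ c1 < 0 ∨ c1 ≥ pvRowLen soup row then acc
      else if r2 < 0 ∨ r2 ≥ (soup.length : Int) ∨ c2 < 0 ∨ c2 ≥ pvRowLen soup row then acc
      else if pvCharAt soup r1 c1 = some 'M' ∧ pvCharAt soup r2 c2 = some 'S' then acc + 1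
      else acc) 0
    masFound == 2

-- ===== PORT B =====
def pvMas (a b : Option Char) : Bool :=
  (a = some 'M' ∧ b = some 'S') ∨ (a = some 'S' ∧ b = some 'M')

def is_x_mas_in_position_alt (soup : List String) (row : Int) (column : Int) : Bool :=
  if row < 0 ∨ row ≥ (soup.length : Int) ∨ column < 0 ∨ column ≥ pvRowLen soup row then
    false
  else if pvCharAt soup row column ≠ some 'A' then
    false
  else
    let w := pvRowLen soup row
    if row - 1 < 0 ∨ row + 1 ≥ (soup.length : Int) ∨ column - 1 < 0 ∨ column + 1 ≥ w then
      false
    else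
      let tl := pvCharAt soup (row - 1) (column - 1)
      let tr := pvCharAt soup (row - 1) (column + 1)
      let bl := pvCharAt soup (row + 1) (column - 1)
      let br := pvCharAt soup (row + 1) (column + 1)
      pvMas tl br && pvMas tr bl

-- ===== PRECONDITION & SPEC =====
-- Pre_ excludes exactly the inputs on which the Python A raises IndexError: the center is an
-- in-bounds 'A', all four corners pass A's bounds test (which measures every column against the
-- CENTER row's width), yet some corner column is out of range in its own (shorter) row.
-- Both A and B raise IndexError there, so nothing returnable is excluded.
def Pre_is_x_mas_in_position (soup : List String) (row : Int) (column : Int) : Prop :=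
  ¬ (0 ≤ row ∧ row < (soup.length : Int) ∧ 0 ≤ column ∧ column < pvRowLen soup row ∧
     pvCharAt soup row column = some 'A' ∧
     1 ≤ row ∧ row + 1 < (soup.length : Int) ∧ 1 ≤ column ∧ column + 1 < pvRowLen soup row ∧
     ((pvCharAt soup (row - 1) (column - 1) = none) ∨
      (pvCharAt soup (row - 1) (column + 1) = none) ∨
      (pvCharAt soup (row + 1) (column - 1) = none) ∨
      (pvCharAt soup (row + 1) (column + 1) = none)))
instance (soup : List String) (row : Int) (column : Int) : Decidable (Pre_is_x_mas_in_position soup row column) := by unfold Pre_is_x_mas_in_position; infer_instance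

def pvWitness_is_x_mas_in_position : List String × Int × Int := (["MXS", "XAX", "MXS"], 1, 1)

def Spec_is_x_mas_in_position (soup : List String) (row : Int) (column : Int) (out : Bool) : Prop := out = is_x_mas_in_position_alt soup row column
instance (soup : List String) (row : Int) (column : Int) (out : Bool) : Decidable (Spec_is_x_mas_in_position soup row column out) := by unfold Spec_is_x_mas_in_position; infer_instance

-- ===== CLAIM (what is proved, stated in full; the proofs are below) =====
def Claim_equal_is_x_mas_in_position : Prop := ∀ (soup : List String) (row : Int) (column : Int), Dom_is_x_mas_in_position soup row column → Pre_is_x_mas_in_position soup row column → Spec_is_x_mas_in_position soup row column (is_x_mas_in_position soup row column)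

-- ===== LEMMAS AND PROOFS =====

-- an orientation whose bounds test fails (for either corner) leaves the counter unchanged
theorem pv_skip {G G' C : Prop} [Decidable G] [Decidable G'] [Decidable C] (h : G ∨ G')
    (acc : Nat) : (if G then acc else if G' then acc else if C then acc + 1 else acc) = acc := by
  rcases h with h | h
  · rw [if_pos h]
  · by_cases hG : G
    · rw [if_pos hG]
    · rw [if_neg hG, if_pos h]

-- the counter over the four orientations reaches 2 exactly when both diagonals are M/S pairs
theorem pv_count_eq_two (tl tr bl br : Option Char) :
    ((let x1 : Nat := if bl = some 'M' ∧ tr = some 'S' then 0 + 1 else 0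
      let x2 := if br = some 'M' ∧ tl = some 'S' then x1 + 1 else x1
      let x3 := if tl = some 'M' ∧ br = some 'S' then x2 + 1 else x2
      let x4 := if tr = some 'M' ∧ bl = some 'S' then x3 + 1 else x3
      x4) == 2) = (pvMas tl br && pvMas tr bl) := by
  by_cases a1 : tl = some 'M' <;> by_cases a2 : tl = some 'S' <;>
  by_cases a3 : tr = some 'M' <;> by_cases a4 : tr = some 'S' <;>
  by_cases a5 : bl = some 'M' <;> by_cases a6 : bl = some 'S' <;>
  by_cases a7 : br = some 'M' <;> by_cases a8 : br = some 'S' <;>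
  simp_all [pvMas]

-- ===== VERDICT (by name: the statement is the Claim_ definition above) =====
theorem is_x_mas_in_position_spec : Claim_equal_is_x_mas_in_position := by
  intro soup row column _ _
  unfold Spec_is_x_mas_in_position is_x_mas_in_position is_x_mas_in_position_alt
  by_cases h0 : row < 0 ∨ row ≥ (soup.length : Int) ∨ column < 0 ∨ column ≥ pvRowLen soup row
  · simp [h0]
  · simp only [if_neg h0]
    by_cases hA : pvCharAt soup row column = some 'A'
    · rw [if_neg (fun h => h hA), if_neg (fun h => h hA)]
      -- both sides past the center guards; unfold the 4-orientation fold
      simp only [pvOrients, List.foldl]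
      by_cases hQ : row - 1 < 0 ∨ row + 1 ≥ (soup.length : Int) ∨ column - 1 < 0 ∨ column + 1 ≥ pvRowLen soup row
      · -- some corner out of A's (center-width) bounds: every orientation is skipped, B returns false
        rw [if_pos hQ]
        have k1 : (row + 1 < 0 ∨ row + 1 ≥ (soup.length : Int) ∨ column + -1 < 0 ∨ column + -1 ≥ pvRowLen soup row)
                ∨ (row + -1 < 0 ∨ row + -1 ≥ (soup.length : Int) ∨ column + 1 < 0 ∨ column + 1 ≥ pvRowLen soup row) := by omega
        have k2 : (row + 1 < 0 ∨ row + 1 ≥ (soup.length : Int) ∨ column + 1 < 0 ∨ column + 1 ≥ pvRowLen soup row)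
                ∨ (row + -1 < 0 ∨ row + -1 ≥ (soup.length : Int) ∨ column + -1 < 0 ∨ column + -1 ≥ pvRowLen soup row) := by omega
        rw [pv_skip k1.symm _, pv_skip k2.symm _, pv_skip k2 _, pv_skip k1 _]
        decide
      · -- all corners pass the bounds test: reduce to the counting lemma
        rw [if_neg hQ]
        have gpm : ¬(row + 1 < 0 ∨ row + 1 ≥ (soup.length : Int) ∨ column + -1 < 0 ∨ column + -1 ≥ pvRowLen soup row) := by omega
        have gpp : ¬(row + 1 < 0 ∨ row + 1 ≥ (soup.length : Int) ∨ column + 1 < 0 ∨ column + 1 ≥ pvRowLen soup row) := by omega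
        have gmm : ¬(row + -1 < 0 ∨ row + -1 ≥ (soup.length : Int) ∨ column + -1 < 0 ∨ column + -1 ≥ pvRowLen soup row) := by omega
        have gmp : ¬(row + -1 < 0 ∨ row + -1 ≥ (soup.length : Int) ∨ column + 1 < 0 ∨ column + 1 ≥ pvRowLen soup row) := by omega
        simp only [if_neg gpm, if_neg gpp, if_neg gmm, if_neg gmp]
        simp only [Int.sub_eq_add_neg]
        exact pv_count_eq_two _ _ _ _
    · rw [if_pos hA, if_pos hA]
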